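-- pv_equiv track=rewrite | github.com/arbiben/cracking_the_coding_interview | recursion_and_dynamic_programming/coins.py | count_dimes
-- ===== SOURCE A (Python) =====
-- def count_dimes(n):
--     if n == 0:
--         return 1
--     if n < 0:
--         return 0
--     d = 0
--     ans = 0
--     while n > d:
--         ans += count_nickels(n-d)
--         d += 10
--     return ans
--
-- def count_nickels(n):
--     if n == 0:
--         return 1
--     n_amnt = 0
--     ans = 0
--     while n > n_amnt:
--         ans += 1
--         n_amnt += 5
--     return ans
-- ===== SOURCE B (Python) =====
-- def count_dimes(n):
--     if n == 0:
--         return 1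
--     if n < 0:
--         return 0
--     k = (n + 9) // 10          # number of dime amounts 0,10,... below n
--     c = (n + 4) // 5           # ceil(n/5)
--     return k * c - k * (k - 1)
-- ===== Notes on version B (the rewrite author's own statement) =====
-- stated objective: faster
-- what changed: Replaced the nested while loops (sum of count_nickels over dime amounts, each itself a counting loop) with a closed-form arithmetic formula: k*ceil(n/5) - k*(k-1) with k = ceil(n/10).
import Mathlib
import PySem

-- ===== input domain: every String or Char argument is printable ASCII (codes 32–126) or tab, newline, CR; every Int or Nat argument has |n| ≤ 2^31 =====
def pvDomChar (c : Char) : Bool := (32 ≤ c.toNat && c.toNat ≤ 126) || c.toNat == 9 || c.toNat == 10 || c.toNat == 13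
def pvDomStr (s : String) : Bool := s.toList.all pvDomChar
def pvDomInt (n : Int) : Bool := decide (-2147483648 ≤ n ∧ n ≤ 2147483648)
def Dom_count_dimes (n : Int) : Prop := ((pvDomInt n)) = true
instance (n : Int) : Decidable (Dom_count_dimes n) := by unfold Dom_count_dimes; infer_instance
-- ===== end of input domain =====

-- B replaces A's nested counting loops with a closed-form arithmetic formula (O(1) vs O(n^2)).


-- ===== PORT A =====
-- helper: the while loop of count_nickels (state: n_amnt, ans)
def nickLoop (n n_amnt ans : Int) : Int :=
  if n > n_amnt then nickLoop n (n_amnt + 5) (ans + 1) else ans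
termination_by (n - n_amnt).toNat
decreasing_by omega

def count_nickels (n : Int) : Int :=
  if n = 0 then 1 else nickLoop n 0 0

-- helper: the while loop of count_dimes (state: d, ans)
def dimeLoop (n d ans : Int) : Int :=
  if n > d then dimeLoop n (d + 10) (ans + count_nickels (n - d)) else ans
termination_by (n - d).toNat
decreasing_by omega

def count_dimes (n : Int) : Int :=
  if n = 0 then 1
  else if n < 0 then 0
  else dimeLoop n 0 0

-- ===== PORT B =====
def count_dimes_alt (n : Int) : Int :=
  if n = 0 then 1
  else if n < 0 then 0
  else
    let k := PySem.Int.floordiv (n + 9) 10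
    let c := PySem.Int.floordiv (n + 4) 5
    k * c - k * (k - 1)

-- ===== PRECONDITION & SPEC =====
def Spec_count_dimes (n : Int) (out : Int) : Prop := out = count_dimes_alt n
instance (n : Int) (out : Int) : Decidable (Spec_count_dimes n out) := by unfold Spec_count_dimes; infer_instance

-- ===== CLAIM (what is proved, stated in full; the proofs are below) =====
def Claim_equal_count_dimes : Prop := ∀ (n : Int), Dom_count_dimes n → Spec_count_dimes n (count_dimes n)

-- ===== LEMMAS AND PROOFS =====

-- nickLoop counts the steps: ans + ceil((n - a)/5) (0 if n ≤ a)
theorem nickLoop_eq (n a ans : Int) :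
    nickLoop n a ans = ans + (if n ≤ a then 0 else (n - a + 4) / 5) := by
  fun_induction nickLoop n a ans with
  | case1 a ans hgt ih =>
    rw [ih]
    split_ifs with h1 h2 <;> omega
  | case2 a ans hgt =>
    rw [if_pos (by omega)]
    omega

theorem count_nickels_pos (m : Int) (hm : 0 < m) :
    count_nickels m = (m + 4) / 5 := by
  unfold count_nickels
  have h0 : m ≠ 0 := by omega
  rw [if_neg h0, nickLoop_eq]
  have : ¬ m ≤ 0 := by omega
  simp [this]

-- closed form of the remaining dime sum, as a function of m = n - d
def dimeSum (m : Int) : Int :=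
  if m ≤ 0 then 0
  else ((m + 9) / 10) * ((m + 4) / 5) - ((m + 9) / 10) * ((m + 9) / 10 - 1)

theorem dimeSum_step (m : Int) (hm : 0 < m) :
    dimeSum m = (m + 4) / 5 + dimeSum (m - 10) := by
  unfold dimeSum
  have h1 : ¬ m ≤ 0 := by omega
  rw [if_neg h1]
  by_cases h2 : m - 10 ≤ 0
  · rw [if_pos h2]
    have hk : (m + 9) / 10 = 1 := by omega
    rw [hk]; ring
  · rw [if_neg h2]
    have hk : (m - 10 + 9) / 10 = (m + 9) / 10 - 1 := by omega
    have hc : (m - 10 + 4) / 5 = (m + 4) / 5 - 2 := by omega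
    rw [hk, hc]; ring

theorem dimeLoop_eq (n d ans : Int) :
    dimeLoop n d ans = ans + dimeSum (n - d) := by
  fun_induction dimeLoop n d ans with
  | case1 d ans hgt ih =>
    rw [ih]
    rw [count_nickels_pos (n - d) (by omega), dimeSum_step (n - d) (by omega)]
    have : n - (d + 10) = n - d - 10 := by ring
    rw [this]; ring
  | case2 d ans hgt =>
    unfold dimeSum
    rw [if_pos (by omega)]
    omega

-- ===== VERDICT (by name: the statement is the Claim_ definition above) =====
theorem count_dimes_spec : Claim_equal_count_dimes := by
  intro n _
  unfold Spec_count_dimes count_dimes count_dimes_alt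
  by_cases h0 : n = 0
  · simp [h0]
  · rw [if_neg h0, if_neg h0]
    by_cases hneg : n < 0
    · simp [hneg]
    · rw [if_neg hneg, if_neg hneg, dimeLoop_eq]
      have hpos : 0 < n := by omega
      unfold dimeSum
      rw [PySem.Int.floordiv_eq_ediv_of_pos (by omega),
          PySem.Int.floordiv_eq_ediv_of_pos (by omega)]
      simp only [sub_zero]
      rw [if_neg (by omega)]
      ring
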